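-- pv_equiv track=rewrite | github.com/MightyCode/GDMC2021Tsukuba | utils/_utils.py | makeBookItem
-- ===== SOURCE A (Python) =====
-- def makeBookItem(text, title = "", author = "", desc = ""):
--     booktext = "pages:["
--     while len(text) > 0:
--         page = text[:15*23]
--         text = text[15*23:]
--         bookpage = "'{\"text\":\""
--         while len(page) > 0:
--             line = page[:23]
--             page = page[23:]
--             bookpage += line + "\\\\n"
--         bookpage += "\"}',"
--         booktext += bookpage
--
--     booktext = booktext + "],"
--
--     booktitle = "title:\""+title+"\","
--     bookauthor = "author:\""+author+"\","
--     bookdesc = "display:{Lore:[\""+desc+"\"]}"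
--     return "written_book{"+booktext+booktitle+bookauthor+bookdesc+"}"
-- ===== SOURCE B (Python) =====
-- def makeBookItem(text, title = "", author = "", desc = ""):
--     # one flat pass over the text producing 23-char lines, then grouping into 15-line pages
--     lines = []
--     while text:
--         lines.append(text[:23])
--         text = text[23:]
--     pages = []
--     while lines:
--         page, lines = lines[:15], lines[15:]
--         pages.append("'{\"text\":\"" + "".join(line + "\\\\n" for line in page) + "\"}',")
--     return ("written_book{pages:[" + "".join(pages) + "],"
--             + "title:\"" + title + "\","
--             + "author:\"" + author + "\","
--             + "display:{Lore:[\"" + desc + "\"]}"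
--             + "}")
-- ===== Notes on version B (the rewrite author's own statement) =====
-- stated objective: alternative
-- what changed: A consumes the text with two nested destructive while-loops (345-char page slices, each re-sliced into 23-char lines, with string += accumulation); B first flattens the text into one list of 23-char lines in a single pass, then groups that list into 15-line pages and joins them.
import Mathlib
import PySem

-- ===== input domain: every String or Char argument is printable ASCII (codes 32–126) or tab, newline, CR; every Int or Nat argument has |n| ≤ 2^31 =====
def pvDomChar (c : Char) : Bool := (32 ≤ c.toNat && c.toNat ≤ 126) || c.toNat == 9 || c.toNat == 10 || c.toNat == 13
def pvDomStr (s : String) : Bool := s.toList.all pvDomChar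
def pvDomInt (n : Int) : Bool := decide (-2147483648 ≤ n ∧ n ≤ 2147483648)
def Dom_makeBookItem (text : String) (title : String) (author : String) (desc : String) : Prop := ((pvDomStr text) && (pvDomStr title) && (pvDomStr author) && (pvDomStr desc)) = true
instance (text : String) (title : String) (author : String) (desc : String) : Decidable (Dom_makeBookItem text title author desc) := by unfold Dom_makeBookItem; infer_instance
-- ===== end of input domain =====

-- B replaces A's nested destructive while-loops by a flat chunk-into-lines pass followed by a
-- grouping of the line list into 15-line pages (alternative decomposition; return value only).

-- ===== PORT A =====
-- slices text[:k] / text[k:] with literal nonnegative k are ported as List.take / List.drop (exact there).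
-- inner while loop: bookpage accumulation
def mbInnerA (page : List Char) (bookpage : String) : String :=
  match page with
  | [] => bookpage
  | c :: cs => mbInnerA ((c :: cs).drop 23) (bookpage ++ String.mk ((c :: cs).take 23) ++ "\\\\n")
termination_by page.length
decreasing_by simp

-- outer while loop: booktext accumulation
def mbOuterA (text : List Char) (booktext : String) : String :=
  match text with
  | [] => booktext
  | c :: cs => mbOuterA ((c :: cs).drop 345) (booktext ++ (mbInnerA ((c :: cs).take 345) "'{\"text\":\"" ++ "\"}',"))
termination_by text.length
decreasing_by simp

def makeBookItem (text : String) (title : String) (author : String) (desc : String) : String :=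
  let booktext := mbOuterA text.toList "pages:[" ++ "],"
  let booktitle := "title:\"" ++ title ++ "\","
  let bookauthor := "author:\"" ++ author ++ "\","
  let bookdesc := "display:{Lore:[\"" ++ desc ++ "\"]}"
  "written_book{" ++ booktext ++ booktitle ++ bookauthor ++ bookdesc ++ "}"

-- ===== PORT B =====
-- 'while text: lines.append(text[:23]); text = text[23:]'
def mbLinesB (text : List Char) : List (List Char) :=
  match text with
  | [] => []
  | c :: cs => (c :: cs).take 23 :: mbLinesB ((c :: cs).drop 23)
termination_by text.length
decreasing_by simp

-- 'while lines: page, lines = lines[:15], lines[15:]; pages.append(...)'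
def mbPagesB (lines : List (List Char)) : List String :=
  match lines with
  | [] => []
  | l :: ls =>
      ("'{\"text\":\"" ++ String.join (((l :: ls).take 15).map (fun line => String.mk line ++ "\\\\n")) ++ "\"}',")
        :: mbPagesB ((l :: ls).drop 15)
termination_by lines.length
decreasing_by simp

def makeBookItem_alt (text : String) (title : String) (author : String) (desc : String) : String :=
  "written_book{pages:[" ++ String.join (mbPagesB (mbLinesB text.toList)) ++ "],"
    ++ "title:\"" ++ title ++ "\","
    ++ "author:\"" ++ author ++ "\","
    ++ "display:{Lore:[\"" ++ desc ++ "\"]}"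
    ++ "}"

-- ===== PRECONDITION & SPEC =====
def Spec_makeBookItem (text : String) (title : String) (author : String) (desc : String) (out : String) : Prop := out = makeBookItem_alt text title author desc
instance (text : String) (title : String) (author : String) (desc : String) (out : String) : Decidable (Spec_makeBookItem text title author desc out) := by unfold Spec_makeBookItem; infer_instance

-- ===== CLAIM (what is proved, stated in full; the proofs are below) =====
def Claim_equal_makeBookItem : Prop := ∀ (text : String) (title : String) (author : String) (desc : String), Dom_makeBookItem text title author desc → Spec_makeBookItem text title author desc (makeBookItem text title author desc)

-- ===== LEMMAS AND PROOFS =====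

theorem strJoin_cons (s : String) (l : List String) : String.join (s :: l) = s ++ String.join l := by
  simp [String.join]
  induction l generalizing s with
  | nil => simp
  | cons t ts ih => simp [List.foldl_cons, ih (s ++ t), ih t, String.append_assoc]

-- A's inner loop equals the join of the 23-char lines of the page, each with the "\\n" suffix.
theorem mbInnerA_eq (page : List Char) (bp : String) :
    mbInnerA page bp = bp ++ String.join ((mbLinesB page).map (fun line => String.mk line ++ "\\\\n")) := by
  match page with
  | [] => rw [mbInnerA, mbLinesB]; simp [String.join]
  | c :: cs =>
      rw [mbInnerA, mbLinesB, mbInnerA_eq ((c :: cs).drop 23)]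
      rw [List.map_cons, strJoin_cons]
      simp [String.append_assoc]
termination_by page.length
decreasing_by simp

-- chunking a prefix/suffix of the text corresponds to take/drop on the line list
theorem mbLinesB_take_drop (k : Nat) (l : List Char) :
    mbLinesB (l.take (23 * k)) = (mbLinesB l).take k ∧
    mbLinesB (l.drop (23 * k)) = (mbLinesB l).drop k := by
  induction k generalizing l with
  | zero => simp [show mbLinesB [] = [] from by rw [mbLinesB]]
  | succ k ih =>
      cases l with
      | nil => simp [show mbLinesB [] = [] from by rw [mbLinesB]]
      | cons c cs =>
          have e1 : (c :: cs).take (23 * (k + 1)) = c :: cs.take (23 * k + 22) := by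
            rw [show 23 * (k + 1) = (23 * k + 22) + 1 from by ring, List.take_succ_cons]
          have e2 : (c :: cs).drop (23 * (k + 1)) = (cs.drop 22).drop (23 * k) := by
            rw [show 23 * (k + 1) = (23 * k + 22) + 1 from by ring, List.drop_succ_cons,
              List.drop_drop]
            congr 1; omega
          constructor
          · rw [e1, mbLinesB, mbLinesB, List.take_succ_cons]
            congr 1
            · show c :: (cs.take (23 * k + 22)).take 22 = c :: cs.take 22
              rw [List.take_take]; congr 1
            · show mbLinesB ((cs.take (23 * k + 22)).drop 22) = (mbLinesB (cs.drop 22)).take k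
              rw [List.drop_take, show 23 * k + 22 - 22 = 23 * k from by omega]
              exact (ih (cs.drop 22)).1
          · rw [e2, (ih (cs.drop 22)).2, mbLinesB, List.drop_succ_cons]; rfl

-- A's outer loop equals the joined page list of B.
theorem mbOuterA_eq (text : List Char) (bt : String) :
    mbOuterA text bt = bt ++ String.join (mbPagesB (mbLinesB text)) := by
  match text with
  | [] => rw [mbOuterA, mbLinesB, mbPagesB]; simp [String.join]
  | c :: cs =>
      rw [mbOuterA, mbOuterA_eq ((c :: cs).drop 345)]
      rw [mbInnerA_eq, show (345 : Nat) = 23 * 15 from rfl,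
          (mbLinesB_take_drop 15 (c :: cs)).1, (mbLinesB_take_drop 15 (c :: cs)).2]
      conv_rhs => rw [mbLinesB]
      rw [mbPagesB, ← mbLinesB]
      rw [strJoin_cons]
      simp [String.append_assoc]
termination_by text.length
decreasing_by simp

-- ===== VERDICT (by name: the statement is the Claim_ definition above) =====
theorem makeBookItem_spec : Claim_equal_makeBookItem := by
  intro text title author desc _
  show makeBookItem text title author desc = makeBookItem_alt text title author desc
  unfold makeBookItem makeBookItem_alt
  have m : ∀ (a b c x : String), a ++ b = c → a ++ (b ++ x) = c ++ x := by
    intro a b c x h; rw [← String.append_assoc, h]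
  rw [mbOuterA_eq]
  simp only [String.append_assoc]
  rw [m _ _ _ _ (by decide : ("written_book{" : String) ++ "pages:[" = "written_book{pages:[")]
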